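-- pv_equiv track=rewrite | github.com/LaienSicet/name-change | nazv_2.py | otrez_lihnee
-- ===== SOURCE A (Python) =====
-- def otrez_lihnee(a):
--     a1 = ''
--     for i in a:
--         if i == ':':
--             a1 += ';'
--         elif i != '.':
--             a1 += i
--         else:
--             return a1
--     return a1
-- ===== SOURCE B (Python) =====
-- def otrez_lihnee(a):
--     # Locate the terminator first, truncate, then substitute ':' -> ';' in one comprehension.
--     head = a[:a.find('.')] if '.' in a else a
--     return ''.join(';' if c == ':' else c for c in head)
-- ===== Notes on version B (the rewrite author's own statement) =====
-- stated objective: idiomatic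
-- what changed: Replaces the char-by-char accumulator loop with early return by a find-and-slice truncation at the first '.' followed by a single comprehension substituting ':' for ';'.
import Mathlib
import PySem

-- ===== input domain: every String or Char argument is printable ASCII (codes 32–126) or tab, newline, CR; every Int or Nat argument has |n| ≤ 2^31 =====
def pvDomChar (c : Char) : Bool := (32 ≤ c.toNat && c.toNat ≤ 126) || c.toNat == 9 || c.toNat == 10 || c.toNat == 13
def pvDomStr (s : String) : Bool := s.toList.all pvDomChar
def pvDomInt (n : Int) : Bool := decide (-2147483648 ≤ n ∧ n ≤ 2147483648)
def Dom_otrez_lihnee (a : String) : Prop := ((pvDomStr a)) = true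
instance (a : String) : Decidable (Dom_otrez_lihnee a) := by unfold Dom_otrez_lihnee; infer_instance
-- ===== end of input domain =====

-- B replaces A's char-by-char accumulator loop (with early return) by find-the-terminator,
-- slice, then a single ':'→';' substitution pass; objective: more idiomatic, same cost.


-- ===== PORT A =====
-- the for-loop over the characters, accumulating a1, with the early 'return a1' on '.'
def otrezLoop : List Char → List Char → List Char
  | [], a1 => a1
  | i :: rest, a1 =>
    if i = ':' then otrezLoop rest (a1 ++ [';'])
    else if i ≠ '.' then otrezLoop rest (a1 ++ [i])
    else a1

def otrez_lihnee (a : String) : String := String.ofList (otrezLoop a.toList [])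

-- ===== PORT B =====
def otrez_lihnee_alt (a : String) : String :=
  let head := if PySem.Str.isIn "." a
    then String.ofList (PySem.List.slice a.toList none (some (PySem.Str.find a ".")))
    else a
  String.ofList (head.toList.map (fun c => if c = ':' then ';' else c))

-- ===== PRECONDITION & SPEC =====
def Spec_otrez_lihnee (a : String) (out : String) : Prop := out = otrez_lihnee_alt a
instance (a : String) (out : String) : Decidable (Spec_otrez_lihnee a out) := by unfold Spec_otrez_lihnee; infer_instance

-- ===== CLAIM (what is proved, stated in full; the proofs are below) =====
def Claim_equal_otrez_lihnee : Prop := ∀ (a : String), Dom_otrez_lihnee a → Spec_otrez_lihnee a (otrez_lihnee a)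

-- ===== LEMMAS AND PROOFS =====

-- A's loop appends the ':'→';' image of the longest '.'-free prefix to the accumulator.
theorem otrezLoop_eq (cs acc : List Char) :
    otrezLoop cs acc = acc ++ (cs.takeWhile (· ≠ '.')).map (fun c => if c = ':' then ';' else c) := by
  induction cs generalizing acc with
  | nil => simp [otrezLoop]
  | cons c rest ih =>
    by_cases hc : c = ':'
    · subst hc; simp [otrezLoop, ih]
    · by_cases hd : c = '.'
      · subst hd; simp [otrezLoop]
      · simp [otrezLoop, hc, hd, ih]

-- Python's str.find for the single-character needle '.'
theorem findgo_dot (cs : List Char) (k : Nat) :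
    PySem.Chars.find.go ['.'] cs k =
      if '.' ∈ cs then ((k : Int) + (cs.takeWhile (· ≠ '.')).length) else -1 := by
  induction cs generalizing k with
  | nil => simp [PySem.Chars.find.go]
  | cons c rest ih =>
    by_cases hd : c = '.'
    · subst hd
      simp [PySem.Chars.find.go, List.isPrefixOf]
    · have hd' : ¬('.' = c) := fun h => hd h.symm
      have hpre : List.isPrefixOf ['.'] (c :: rest) = false := by
        simp [List.isPrefixOf, hd']
      simp only [PySem.Chars.find.go, hpre, Bool.false_eq_true, if_false, ih]
      by_cases hm : '.' ∈ rest
      · simp [hm, hd', hd]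
        ring
      · simp [hm, hd']

theorem takeWhile_take {α : Type} (p : α → Bool) (cs : List α) :
    cs.take (cs.takeWhile p).length = cs.takeWhile p :=
  (List.prefix_iff_eq_take.mp (List.takeWhile_prefix _)).symm

-- ===== VERDICT (by name: the statement is the Claim_ definition above) =====
theorem otrez_lihnee_spec : Claim_equal_otrez_lihnee := by
  intro a _
  unfold Spec_otrez_lihnee otrez_lihnee otrez_lihnee_alt
  have hfind : PySem.Str.find a "." =
      if '.' ∈ a.toList then ((a.toList.takeWhile (· ≠ '.')).length : Int) else -1 := by
    have := findgo_dot a.toList 0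
    simpa [PySem.Str.find, PySem.Chars.find] using this
  have hisin : PySem.Str.isIn "." a = ('.' ∈ a.toList : Bool) := by
    simp [PySem.Str.isIn, PySem.Chars.isIn, PySem.Chars.find, findgo_dot]
    by_cases hm : '.' ∈ a.toList <;> simp [hm]
  rw [otrezLoop_eq]
  by_cases hm : '.' ∈ a.toList
  · simp only [hisin, hm, decide_true, if_true, hfind]
    rw [PySem.List.slice_to]
    · simp [takeWhile_take]
    · positivity
  · have h1 : List.takeWhile (fun x => decide (x ≠ '.')) a.toList = a.toList := by
      rw [List.takeWhile_eq_self_iff]; intro c hc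
      have : c ≠ '.' := fun h => hm (h ▸ hc)
      simp [this]
    simp only [hisin, hm, decide_false, Bool.false_eq_true, if_false, List.nil_append, h1]
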